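-- pv_equiv track=rewrite | github.com/onyuki/1400-zadach-po-programmirivaniu | 11.1-11.102.py | task_11_34_b
-- ===== SOURCE A (Python) =====
-- from typing import List, Union, Sequence
-- from typing import List, Tuple, Union
-- from typing import List, Optional, Tuple
-- from typing import List, Tuple, Optional
-- from typing import List, Tuple, Optional
--
-- Number = Union[int, float]
--
-- def task_11_34_b(arr: Sequence[Number], base: int = 1) -> List[Number]:
--     res = list(arr)
--     for i in range(len(res)):
--         idx = i + 1 if base == 1 else i
--         if idx % 2 == 1:
--             res[i] = res[i] + 1
--         else:
--             res[i] = res[i] - 1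
--     return res
-- ===== SOURCE B (Python) =====
-- def task_11_34_b(arr, base=1):
--     res = list(arr)
--     d = 1 if base == 1 else -1
--     res[0::2] = [x + d for x in res[0::2]]
--     res[1::2] = [x - d for x in res[1::2]]
--     return res
-- ===== Notes on version B (the rewrite author's own statement) =====
-- stated objective: alternative
-- what changed: Replaces the per-element parity branch inside one mutating index loop by computing a single parity delta d from base and applying +d / -d in two branch-free passes over the even- and odd-indexed strided subsequences.
import Mathlib
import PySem

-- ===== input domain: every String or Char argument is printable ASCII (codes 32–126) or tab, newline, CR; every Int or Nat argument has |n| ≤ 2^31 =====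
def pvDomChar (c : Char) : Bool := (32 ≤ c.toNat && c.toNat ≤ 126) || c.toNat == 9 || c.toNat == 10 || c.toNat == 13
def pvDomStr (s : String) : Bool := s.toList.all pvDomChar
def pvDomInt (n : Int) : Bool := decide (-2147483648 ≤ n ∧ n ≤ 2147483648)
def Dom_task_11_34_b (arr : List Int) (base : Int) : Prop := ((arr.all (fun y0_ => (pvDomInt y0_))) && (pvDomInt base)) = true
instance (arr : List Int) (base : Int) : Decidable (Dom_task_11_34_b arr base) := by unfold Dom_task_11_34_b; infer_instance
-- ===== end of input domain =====

-- B replaces A's per-element parity branch inside one index loop by a single delta d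
-- and two branch-free passes over the even- and odd-indexed strided subsequences.

-- ===== PORT A =====
-- literal port of A: copy, then a range-indexed loop mutating res[i] by a parity branch.
-- res[i] is always read in range, so List.getD is exact here.
def task_11_34_b (arr : List Int) (base : Int) : List Int :=
  (List.range arr.length).foldl (fun (res : List Int) (i : Nat) =>
    let idx : Int := if base = 1 then (i : Int) + 1 else (i : Int)
    if PySem.Int.mod idx 2 = 1 then res.set i (res.getD i 0 + 1)
    else res.set i (res.getD i 0 - 1)) arr

-- ===== PORT B =====
-- Source B's strided-slice reads res[0::2] / res[1::2] and writes back; ported as the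
-- even/odd-index subsequences mapped by (+ d) / (- d) and re-interleaved.
def pvEvens : List Int → List Int
  | [] => []
  | [x] => [x]
  | x :: _ :: r => x :: pvEvens r

def pvOdds : List Int → List Int
  | [] => []
  | [_] => []
  | _ :: y :: r => y :: pvOdds r

def pvInterleave : List Int → List Int → List Int
  | [], ys => ys
  | x :: xs, ys => x :: pvInterleave ys xs
  termination_by xs ys => xs.length + ys.length

def task_11_34_b_alt (arr : List Int) (base : Int) : List Int :=
  let d : Int := if base = 1 then 1 else -1
  pvInterleave ((pvEvens arr).map (· + d)) ((pvOdds arr).map (· - d))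

-- ===== PRECONDITION & SPEC =====
def Spec_task_11_34_b (arr : List Int) (base : Int) (out : List Int) : Prop := out = task_11_34_b_alt arr base
instance (arr : List Int) (base : Int) (out : List Int) : Decidable (Spec_task_11_34_b arr base out) := by unfold Spec_task_11_34_b; infer_instance

-- ===== CLAIM (what is proved, stated in full; the proofs are below) =====
def Claim_equal_task_11_34_b : Prop := ∀ (arr : List Int) (base : Int), Dom_task_11_34_b arr base → Spec_task_11_34_b arr base (task_11_34_b arr base)

-- ===== LEMMAS AND PROOFS =====

-- common normal form: map with the index's parity deciding +d vs -d
def pvStep (d : Int) (i : Nat) (x : Int) : Int := if i % 2 = 0 then x + d else x - d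

lemma b_core (d : Int) (l : List Int) :
    pvInterleave ((pvEvens l).map (· + d)) ((pvOdds l).map (· - d))
      = l.mapIdx (pvStep d) := by
  induction l using pvEvens.induct with
  | case1 => simp [pvEvens, pvOdds, pvInterleave]
  | case2 x => simp [pvEvens, pvOdds, pvInterleave, List.mapIdx_cons, pvStep]
  | case3 x y r ih =>
      have hshift : (fun i => pvStep d (i + 1 + 1)) = pvStep d := by
        funext i x
        have h2 : (i + 1 + 1) % 2 = i % 2 := by omega
        simp [pvStep, h2]
      simp only [pvEvens, pvOdds, pvInterleave, List.map_cons, List.mapIdx_cons, hshift, ih]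
      simp [pvStep]

lemma alt_eq (arr : List Int) (base : Int) :
    task_11_34_b_alt arr base = arr.mapIdx (pvStep (if base = 1 then 1 else -1)) := by
  simp [task_11_34_b_alt, b_core]

def pvG (base : Int) (i : Nat) (x : Int) : Int :=
  if PySem.Int.mod (if base = 1 then (i : Int) + 1 else (i : Int)) 2 = 1 then x + 1 else x - 1

lemma g_eq_step (base : Int) : pvG base = pvStep (if base = 1 then 1 else -1) := by
  funext i x
  have h1 : PySem.Int.mod ((i : Int) + 1) 2 = (((i + 1) % 2 : Nat) : Int) := by
    rw [show ((i : Int) + 1) = ((i + 1 : Nat) : Int) by push_cast; ring]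
    exact PySem.Int.mod_natCast _ _
  have h0 : PySem.Int.mod ((i : Int)) 2 = ((i % 2 : Nat) : Int) := PySem.Int.mod_natCast _ _
  rcases eq_or_ne base 1 with hb | hb
  · subst hb
    simp only [pvG, pvStep]
    split_ifs <;> omega
  · simp only [pvG, pvStep, if_neg hb, h0, Nat.cast_eq_one]
    split_ifs <;> omega

lemma a_core (arr : List Int) (base : Int) : ∀ n, n ≤ arr.length →
    (List.range n).foldl (fun (res : List Int) (i : Nat) =>
      let idx : Int := if base = 1 then (i : Int) + 1 else (i : Int)
      if PySem.Int.mod idx 2 = 1 then res.set i (res.getD i 0 + 1)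
      else res.set i (res.getD i 0 - 1)) arr
      = (arr.take n).mapIdx (pvG base) ++ arr.drop n := by
  intro n hn
  induction n with
  | zero => simp
  | succ m ih =>
      have hm : m ≤ arr.length := Nat.le_of_succ_le hn
      have hmlt : m < arr.length := hn
      have hlen : ((arr.take m).mapIdx (pvG base)).length = m := by
        simp [Nat.min_eq_left hm]
      have hdrop : arr.drop m = arr[m] :: arr.drop (m + 1) :=
        List.drop_eq_getElem_cons hmlt
      rw [List.range_succ, List.foldl_append, ih hm]
      simp only [List.foldl_cons, List.foldl_nil]
      have hget : ((arr.take m).mapIdx (pvG base) ++ arr.drop m).getD m 0 = arr[m] := by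
        rw [List.getD_append_right _ _ _ _ (by omega), hlen, Nat.sub_self, hdrop]
        rfl
      have hset : ∀ v : Int, ((arr.take m).mapIdx (pvG base) ++ arr.drop m).set m v
          = (arr.take m).mapIdx (pvG base) ++ (v :: arr.drop (m + 1)) := by
        intro v
        rw [List.set_append, if_neg (by omega), hlen, Nat.sub_self, hdrop]
        rfl
      have htake : (arr.take (m + 1)).mapIdx (pvG base)
          = (arr.take m).mapIdx (pvG base) ++ [pvG base m arr[m]] := by
        rw [List.take_add_one, List.getElem?_eq_getElem hmlt]
        rw [List.mapIdx_append]
        simp [Nat.min_eq_left hm]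
      simp only [hget, hset, htake, pvG, List.append_assoc, List.singleton_append]
      split_ifs <;> rfl

lemma a_eq (arr : List Int) (base : Int) :
    task_11_34_b arr base = arr.mapIdx (pvG base) := by
  have := a_core arr base arr.length le_rfl
  simpa [task_11_34_b] using this

-- ===== VERDICT (by name: the statement is the Claim_ definition above) =====
theorem task_11_34_b_spec : Claim_equal_task_11_34_b := by
  intro arr base _
  unfold Spec_task_11_34_b
  rw [a_eq, alt_eq, g_eq_step]
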